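-- pv_equiv track=rewrite | github.com/akikuno/DAJIN2 | src/DAJIN2/core/consensus/sv_annotator.py | merge_inserted_sequences
-- ===== SOURCE A (Python) =====
-- def merge_inserted_sequences(tag_insertion: list[list[str]], is_insertions: list[bool]) -> list[list[str] | None]:
--     """Merge insertion regions flanked by deletions."""
--     tag_insertion_merged = []
--     tmp_insertions = []
--
--     i = 0
--     while i < len(tag_insertion):
--         if is_insertions[i]:
--             tag_insertion_merged.append([])  # Mark the start of an insertion
--             tmp_insertions += tag_insertion[i]
--
--             # Merge consecutive insertions
--             if i + 1 < len(is_insertions) and is_insertions[i + 1]: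
--                 tmp_insertions += tag_insertion[i + 1]
--                 tag_insertion[i + 1] = []  # Mark as processed
--             else:
--                 tag_insertion_merged.append(tmp_insertions)
--                 tmp_insertions = []
--
--             tag_insertion[i] = []  # Mark current as processed
--         else:
--             tag_insertion_merged.append(None)  # Non-insertion region remains unchanged
--
--         i += 1
--
--     return tag_insertion_merged
-- ===== SOURCE B (Python) =====
-- def merge_inserted_sequences(tag_insertion: list[list[str]], is_insertions: list[bool]) -> list[list[str] | None]:
--     """Merge insertion regions: detect each maximal run of consecutive insertions
--     explicitly, emit one [] marker per position in the run followed by the combined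
--     sequence, and None for non-insertion positions.  Mutates tag_insertion like the
--     original (every insertion entry is set to [])."""
--     merged = []
--     n = len(tag_insertion)
--     i = 0
--     while i < n:
--         if not is_insertions[i]:
--             merged.append(None)
--             i += 1
--         else:
--             run = []
--             j = i
--             while j < n and is_insertions[j]:
--                 merged.append([])
--                 run += tag_insertion[j]
--                 tag_insertion[j] = []
--                 j += 1
--             merged.append(run)
--             i = j
--     return merged
-- ===== Notes on version B (the rewrite author's own statement) =====
-- stated objective: simpler
-- what changed: B detects each maximal run of consecutive insertions with an explicit inner run loop that accumulates the combined sequence, instead of A's one-step lookahead with a persistent tmp buffer and marking the next entry processed so later iterations re-read an emptied slot.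
import Mathlib
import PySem

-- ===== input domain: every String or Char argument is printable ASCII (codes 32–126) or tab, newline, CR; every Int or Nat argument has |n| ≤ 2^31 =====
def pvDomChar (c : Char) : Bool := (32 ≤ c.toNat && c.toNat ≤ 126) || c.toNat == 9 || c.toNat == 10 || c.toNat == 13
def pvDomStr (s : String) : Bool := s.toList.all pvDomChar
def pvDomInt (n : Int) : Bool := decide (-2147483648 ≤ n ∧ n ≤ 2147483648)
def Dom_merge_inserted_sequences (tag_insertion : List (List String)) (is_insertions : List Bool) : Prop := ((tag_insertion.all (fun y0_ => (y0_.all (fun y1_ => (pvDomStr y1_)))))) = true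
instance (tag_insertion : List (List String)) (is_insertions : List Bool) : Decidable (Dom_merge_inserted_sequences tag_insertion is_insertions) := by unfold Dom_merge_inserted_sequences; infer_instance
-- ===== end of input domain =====

-- B detects each maximal run of consecutive insertions with an explicit inner run
-- loop instead of A's one-step lookahead with a persistent tmp buffer (objective:
-- simpler); B performs the same in-place zeroing of insertion entries as A — the
-- theorems below are about the RETURN value only.

-- ===== PORT A =====
-- Literal port of A's while loop: state = (mutated tag list, index i, merged, tmp).
-- fuel only makes the recursion structural; the entry point passes tag.length,
-- enough for the loop (i increases by 1 each iteration and stops at tag.length).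
def pyA_loop (fuel : Nat) (tag : List (List String)) (iss : List Bool) (i : Nat)
    (merged : List (Option (List String))) (tmp : List String) :
    List (Option (List String)) :=
  match fuel with
  | 0 => merged
  | fuel + 1 =>
    if i < tag.length then
      if iss.getD i false then
        if i + 1 < iss.length ∧ iss.getD (i + 1) false = true then
          pyA_loop fuel ((tag.set (i + 1) []).set i []) iss (i + 1)
            (merged ++ [some []]) ((tmp ++ tag.getD i []) ++ tag.getD (i + 1) [])
        else
          pyA_loop fuel (tag.set i []) iss (i + 1)
            ((merged ++ [some []]) ++ [some (tmp ++ tag.getD i [])]) []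
      else
        pyA_loop fuel tag iss (i + 1) (merged ++ [none]) tmp
    else merged

def merge_inserted_sequences (tag_insertion : List (List String)) (is_insertions : List Bool) : List (Option (List String)) :=
  pyA_loop tag_insertion.length tag_insertion is_insertions 0 [] []

-- ===== PORT B =====
-- Inner run loop of B: returns (mutated tag, merged with the [] markers, run buffer,
-- exit index).  fuel is a structural-recursion guard only; callers always pass
-- at least tag.length - j, enough for the loop.
def pyB_run (fuel : Nat) (tag : List (List String)) (iss : List Bool) (j : Nat)
    (merged : List (Option (List String))) (run : List String) :
    List (List String) × List (Option (List String)) × List String × Nat :=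
  match fuel with
  | 0 => (tag, merged, run, j)
  | fuel + 1 =>
    if j < tag.length ∧ iss.getD j false = true then
      pyB_run fuel (tag.set j []) iss (j + 1) (merged ++ [some []]) (run ++ tag.getD j [])
    else (tag, merged, run, j)

-- Outer loop of B: run-detection per position (fuel again a structural guard;
-- the outer loop advances i at least once per iteration).
def pyB_outer (fuel : Nat) (tag : List (List String)) (iss : List Bool) (i : Nat)
    (merged : List (Option (List String))) : List (Option (List String)) :=
  match fuel with
  | 0 => merged
  | fuel + 1 =>
    if i < tag.length then
      if iss.getD i false = true then
        let res := pyB_run (fuel + 1) tag iss i merged []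
        pyB_outer fuel res.1 iss res.2.2.2 (res.2.1 ++ [some res.2.2.1])
      else
        pyB_outer fuel tag iss (i + 1) (merged ++ [none])
    else merged

def merge_inserted_sequences_alt (tag_insertion : List (List String)) (is_insertions : List Bool) : List (Option (List String)) :=
  pyB_outer tag_insertion.length tag_insertion is_insertions 0 []

-- ===== PRECONDITION & SPEC =====
-- Pre_ excludes exactly the inputs on which A raises IndexError: is_insertions
-- shorter than tag_insertion (is_insertions[i] out of range), or is_insertions
-- longer with True at both positions len-1 and len (tag_insertion[i+1] out of range).
def Pre_merge_inserted_sequences (tag_insertion : List (List String)) (is_insertions : List Bool) : Prop :=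
  tag_insertion.length ≤ is_insertions.length ∧
  ¬(tag_insertion.length < is_insertions.length ∧ 0 < tag_insertion.length ∧
    is_insertions.getD (tag_insertion.length - 1) false = true ∧
    is_insertions.getD tag_insertion.length false = true)
instance (tag_insertion : List (List String)) (is_insertions : List Bool) : Decidable (Pre_merge_inserted_sequences tag_insertion is_insertions) := by unfold Pre_merge_inserted_sequences; infer_instance

def pvWitness_merge_inserted_sequences : List (List String) × List Bool := ([["a"], ["b"], []], [true, true, false])

def Spec_merge_inserted_sequences (tag_insertion : List (List String)) (is_insertions : List Bool) (out : List (Option (List String))) : Prop := out = merge_inserted_sequences_alt tag_insertion is_insertions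
instance (tag_insertion : List (List String)) (is_insertions : List Bool) (out : List (Option (List String))) : Decidable (Spec_merge_inserted_sequences tag_insertion is_insertions out) := by unfold Spec_merge_inserted_sequences; infer_instance

-- ===== CLAIM (what is proved, stated in full; the proofs are below) =====
def Claim_equal_merge_inserted_sequences : Prop := ∀ (tag_insertion : List (List String)) (is_insertions : List Bool), Dom_merge_inserted_sequences tag_insertion is_insertions → Pre_merge_inserted_sequences tag_insertion is_insertions → Spec_merge_inserted_sequences tag_insertion is_insertions (merge_inserted_sequences tag_insertion is_insertions)

-- ===== LEMMAS AND PROOFS =====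

-- pyB_run exits immediately (whatever the fuel) when its condition fails.
theorem pyB_run_exit (fuel : Nat) (tag : List (List String)) (iss : List Bool) (j : Nat)
    (m : List (Option (List String))) (r : List String)
    (h : ¬(j < tag.length ∧ iss.getD j false = true)) :
    pyB_run fuel tag iss j m r = (tag, m, r, j) := by
  cases fuel with
  | zero => rfl
  | succ fuel => rw [pyB_run, if_neg h]

-- A's lookahead condition coincides with B's run condition at the next index,
-- under the precondition.
theorem cond_equiv (tag : List (List String)) (iss : List Bool) (i : Nat)
    (hlen : tag.length ≤ iss.length)
    (hP : ¬(tag.length < iss.length ∧ 0 < tag.length ∧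
        iss.getD (tag.length - 1) false = true ∧ iss.getD tag.length false = true))
    (hi : i < tag.length) (hins : iss.getD i false = true) :
    (i + 1 < iss.length ∧ iss.getD (i + 1) false = true) ↔
    (i + 1 < tag.length ∧ iss.getD (i + 1) false = true) := by
  constructor
  · rintro ⟨h1, h2⟩
    refine ⟨?_, h2⟩
    by_contra hcon
    have he : i + 1 = tag.length := by omega
    exact hP ⟨by omega, by omega, by rw [← he]; simpa using hins, by rw [← he]; exact h2⟩
  · rintro ⟨h1, h2⟩; exact ⟨by omega, h2⟩

-- The main simultaneous induction: outer-state agreement and mid-run agreement.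
theorem both_lemma (iss : List Bool) (k : Nat) :
    ∀ (tag : List (List String)) (i : Nat), tag.length - i ≤ k →
    tag.length ≤ iss.length →
    ¬(tag.length < iss.length ∧ 0 < tag.length ∧
        iss.getD (tag.length - 1) false = true ∧ iss.getD tag.length false = true) →
    ((∀ fa fb merged, tag.length - i ≤ fa → tag.length - i ≤ fb →
        pyA_loop fa tag iss i merged [] = pyB_outer fb tag iss i merged) ∧
     (∀ fa fr fb merged tmp, tag.length - i ≤ fa → tag.length - i ≤ fr → tag.length - i ≤ fb →
        i < tag.length → iss.getD i false = true → tag.getD i [] = [] →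
        pyA_loop fa tag iss i merged tmp =
          pyB_outer fb (pyB_run fr tag iss i merged tmp).1 iss
            (pyB_run fr tag iss i merged tmp).2.2.2
            ((pyB_run fr tag iss i merged tmp).2.1 ++ [some (pyB_run fr tag iss i merged tmp).2.2.1]))) := by
  induction k with
  | zero =>
    intro tag i hk _ _
    have hni : ¬ i < tag.length := by omega
    constructor
    · intro fa fb merged _ _
      cases fa <;> cases fb <;> simp [pyA_loop, pyB_outer, hni]
    · intro fa fr fb merged tmp _ _ _ hi; exact absurd hi hni
  | succ k ih =>
    intro tag i hk hlen hP
    by_cases hi : i < tag.length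
    · constructor
      · -- outer state
        intro fa fb merged hfa hfb
        obtain ⟨fa', rfl⟩ : ∃ fa', fa = fa' + 1 := ⟨fa - 1, by omega⟩
        obtain ⟨fb', rfl⟩ : ∃ fb', fb = fb' + 1 := ⟨fb - 1, by omega⟩
        rw [pyA_loop, pyB_outer]
        simp only [if_pos hi]
        by_cases hins : iss.getD i false = true
        · simp only [hins, if_pos]
          -- unfold one step of the inner run loop of B
          rw [pyB_run]
          simp only [if_pos (And.intro hi hins)]
          by_cases hc : i + 1 < iss.length ∧ iss.getD (i + 1) false = true
          · simp only [if_pos hc]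
            have hcB : i + 1 < tag.length ∧ iss.getD (i + 1) false = true :=
              (cond_equiv tag iss i hlen hP hi hins).1 hc
            have hlen2 : ((tag.set (i + 1) []).set i []).length = tag.length := by
              simp only [List.length_set]
            have hrun := (ih ((tag.set (i + 1) []).set i []) (i + 1)
                (by rw [hlen2]; omega) (by rw [hlen2]; exact hlen) (by rw [hlen2]; exact hP)).2
                fa' fb' fb' (merged ++ [some []]) (([] ++ tag.getD i []) ++ tag.getD (i + 1) [])
                (by rw [hlen2]; omega) (by rw [hlen2]; omega) (by rw [hlen2]; omega)
                (by rw [hlen2]; exact hcB.1) hcB.2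
                (by simp [List.getD_eq_getElem?_getD, hcB.1])
            rw [hrun]
            -- converge both pyB_run calls after one more step each
            obtain ⟨fb'', rfl⟩ : ∃ fb'', fb' = fb'' + 1 := ⟨fb' - 1, by omega⟩
            rw [pyB_run]
            simp only [if_pos (show i + 1 < ((tag.set (i + 1) []).set i []).length ∧ iss.getD (i + 1) false = true by
              rw [hlen2]; exact hcB)]
            conv_rhs => rw [pyB_run]
            rw [if_pos (show i + 1 < (tag.set i []).length ∧ iss.getD (i + 1) false = true by
              rw [List.length_set]; exact hcB)]
            have hgd0 : ((tag.set (i + 1) []).set i []).getD (i + 1) [] = [] := by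
              simp [List.getD_eq_getElem?_getD, hcB.1]
            have hgd1 : (tag.set i []).getD (i + 1) [] = tag.getD (i + 1) [] := by
              have hne : i ≠ i + 1 := by omega
              simp [List.getD_eq_getElem?_getD, List.getElem?_set_ne hne]
            have htag : ((tag.set (i + 1) []).set i []).set (i + 1) [] = (tag.set i []).set (i + 1) [] := by
              rw [List.set_comm _ _ (by omega : i + 1 ≠ i), List.set_set]
            rw [hgd0, hgd1, htag]
            simp
          · simp only [if_neg hc]
            have hcB : ¬(i + 1 < (tag.set i []).length ∧ iss.getD (i + 1) false = true) := by
              rw [List.length_set]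
              exact fun hx => hc ((cond_equiv tag iss i hlen hP hi hins).2 hx)
            rw [pyB_run_exit fb' _ _ _ _ _ hcB]
            have := (ih (tag.set i []) (i + 1)
                (by rw [List.length_set]; omega) (by rw [List.length_set]; exact hlen)
                (by rw [List.length_set]; exact hP)).1
                fa' fb' ((merged ++ [some []]) ++ [some ([] ++ tag.getD i [])])
                (by rw [List.length_set]; omega) (by rw [List.length_set]; omega)
            simpa using this
        · simp only [if_neg hins]
          exact (ih tag (i + 1) (by omega) hlen hP).1 fa' fb' (merged ++ [none])
            (by omega) (by omega)
      · -- mid-run state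
        intro fa fr fb merged tmp hfa hfr hfb hilt hins hzero
        obtain ⟨fa', rfl⟩ : ∃ fa', fa = fa' + 1 := ⟨fa - 1, by omega⟩
        obtain ⟨fr', rfl⟩ : ∃ fr', fr = fr' + 1 := ⟨fr - 1, by omega⟩
        rw [pyA_loop]
        simp only [if_pos hilt, hins, if_pos]
        conv_rhs => rw [pyB_run]
        rw [if_pos (And.intro hilt hins)]
        by_cases hc : i + 1 < iss.length ∧ iss.getD (i + 1) false = true
        · simp only [if_pos hc]
          have hcB : i + 1 < tag.length ∧ iss.getD (i + 1) false = true :=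
            (cond_equiv tag iss i hlen hP hilt hins).1 hc
          have hlen2 : ((tag.set (i + 1) []).set i []).length = tag.length := by
            simp only [List.length_set]
          have hrun := (ih ((tag.set (i + 1) []).set i []) (i + 1)
              (by rw [hlen2]; omega) (by rw [hlen2]; exact hlen) (by rw [hlen2]; exact hP)).2
              fa' fr' fb (merged ++ [some []]) ((tmp ++ tag.getD i []) ++ tag.getD (i + 1) [])
              (by rw [hlen2]; omega) (by rw [hlen2]; omega) (by rw [hlen2]; omega)
              (by rw [hlen2]; exact hcB.1) hcB.2
              (by simp [List.getD_eq_getElem?_getD, hcB.1])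
          rw [hrun]
          obtain ⟨fr'', rfl⟩ : ∃ fr'', fr' = fr'' + 1 := ⟨fr' - 1, by omega⟩
          rw [pyB_run]
          simp only [if_pos (show i + 1 < ((tag.set (i + 1) []).set i []).length ∧ iss.getD (i + 1) false = true by
            rw [hlen2]; exact hcB)]
          conv_rhs => rw [pyB_run]
          rw [if_pos (show i + 1 < (tag.set i []).length ∧ iss.getD (i + 1) false = true by
            rw [List.length_set]; exact hcB)]
          have hgd0 : ((tag.set (i + 1) []).set i []).getD (i + 1) [] = [] := by
            simp [List.getD_eq_getElem?_getD, hcB.1]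
          have hgd1 : (tag.set i []).getD (i + 1) [] = tag.getD (i + 1) [] := by
            have hne : i ≠ i + 1 := by omega
            simp [List.getD_eq_getElem?_getD, List.getElem?_set_ne hne]
          have htag : ((tag.set (i + 1) []).set i []).set (i + 1) [] = (tag.set i []).set (i + 1) [] := by
            rw [List.set_comm _ _ (by omega : i + 1 ≠ i), List.set_set]
          rw [hgd0, hgd1, htag, hzero]
          simp
        · simp only [if_neg hc]
          have hcB : ¬(i + 1 < (tag.set i []).length ∧ iss.getD (i + 1) false = true) := by
            rw [List.length_set]
            exact fun hx => hc ((cond_equiv tag iss i hlen hP hilt hins).2 hx)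
          rw [pyB_run_exit fr' _ _ _ _ _ hcB]
          have := (ih (tag.set i []) (i + 1)
              (by rw [List.length_set]; omega) (by rw [List.length_set]; exact hlen)
              (by rw [List.length_set]; exact hP)).1
              fa' fb ((merged ++ [some []]) ++ [some (tmp ++ tag.getD i [])])
              (by rw [List.length_set]; omega) (by rw [List.length_set]; omega)
          simpa using this
    · constructor
      · intro fa fb merged _ _
        cases fa <;> cases fb <;> simp [pyA_loop, pyB_outer, hi]
      · intro fa fr fb merged tmp _ _ _ hilt; exact absurd hilt hi

-- ===== VERDICT (by name: the statement is the Claim_ definition above) =====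
theorem merge_inserted_sequences_spec : Claim_equal_merge_inserted_sequences := by
  intro tag iss _ hpre
  unfold Spec_merge_inserted_sequences merge_inserted_sequences merge_inserted_sequences_alt
  exact (both_lemma iss tag.length tag 0 (by omega) hpre.1 hpre.2).1
    tag.length tag.length [] (by omega) (by omega)
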